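-- pv_equiv track=rewrite | github.com/AdityaSinghh7/Advanced-Algorithms | Project-1/source-code/tim_sort.py | run_decomposition
-- ===== SOURCE A (Python) =====
-- from typing import List, Tuple
--
-- def minrun(n: int) -> int:
--     r = 0
--     while n >= 64:
--         r |= n & 1
--         n >>= 1
--     return n + r
--
-- def binary_insertion_sort(a: List[int], left: int, right: int) -> None:
--     for i in range(left + 1, right):
--         key = a[i]
--         lo, hi = left, i
--         while lo < hi:
--             mid = (lo + hi) // 2
--             if a[mid] <= key:
--                 lo = mid + 1
--             else:
--                 hi = mid
--         a[lo+1:i+1] = a[lo:i]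
--         a[lo] = key
--
-- def run_decomposition(a: List[int]) -> List[Tuple[int,int]]:
--     n = len(a)
--     m = minrun(n)
--     runs: List[Tuple[int,int]] = []
--     i = 0
--     while i < n:
--         start = i
--         i += 1
--
--         if i < n and a[i] < a[i-1]:
--
--             while i < n and a[i] < a[i-1]:
--                 i += 1
--             a[start:i] = reversed(a[start:i])
--         else:
--
--             while i < n and a[i] >= a[i-1]:
--                 i += 1
--
--         run_len = i - start
--         if run_len < m:
--             end = min(start + m, n)
--             binary_insertion_sort(a, start, end)
--             i = end
--         runs.append((start, i))
--     return runs
-- ===== SOURCE B (Python) =====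
-- from typing import List, Tuple
--
-- def _minrun(n: int) -> int:
--     r = 0
--     while n >= 64:
--         r |= n & 1
--         n >>= 1
--     return n + r
--
-- def _insertion_sort(a: List[int], left: int, right: int) -> None:
--     # classic stable linear insertion sort on a[left:right]
--     for i in range(left + 1, right):
--         key = a[i]
--         j = i - 1
--         while j >= left and a[j] > key:
--             a[j + 1] = a[j]
--             j -= 1
--         a[j + 1] = key
--
-- def _natural_run(a: List[int], start: int, n: int) -> int:
--     """End of the maximal natural run at start; reverses a strictly descending run in place."""
--     i = start + 1
--     if i < n and a[i] < a[i - 1]: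
--         while i < n and a[i] < a[i - 1]:
--             i += 1
--         a[start:i] = a[start:i][::-1]
--     else:
--         while i < n and a[i] >= a[i - 1]:
--             i += 1
--     return i
--
-- def run_decomposition(a: List[int]) -> List[Tuple[int, int]]:
--     n = len(a)
--     m = _minrun(n)
--     runs: List[Tuple[int, int]] = []
--     start = 0
--     while start < n:
--         end = _natural_run(a, start, n)
--         if end - start < m:
--             end = min(start + m, n)
--             _insertion_sort(a, start, end)
--         runs.append((start, end))
--         start = end
--     return runs
-- ===== Notes on version B (the rewrite author's own statement) =====
-- stated objective: simpler
-- what changed: The binary-search-plus-slice-shift insertion helper is replaced by a classic backward-shifting linear insertion sort (strict > comparison keeps the same stable placement), and run detection is factored into a helper; the run-decomposition result and the in-place array mutation are identical.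
import Mathlib
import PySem

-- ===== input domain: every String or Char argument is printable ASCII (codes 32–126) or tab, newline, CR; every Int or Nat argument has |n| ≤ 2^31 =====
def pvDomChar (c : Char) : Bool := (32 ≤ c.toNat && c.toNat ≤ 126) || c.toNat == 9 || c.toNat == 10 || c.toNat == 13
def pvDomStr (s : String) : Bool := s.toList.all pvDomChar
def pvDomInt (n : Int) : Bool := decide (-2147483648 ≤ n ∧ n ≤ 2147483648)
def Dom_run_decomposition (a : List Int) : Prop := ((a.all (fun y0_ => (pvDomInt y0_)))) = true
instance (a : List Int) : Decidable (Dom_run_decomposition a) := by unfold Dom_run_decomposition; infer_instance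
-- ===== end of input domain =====

-- B changes only the insertion-sort helper (backward-shift linear insertion instead of binary search
-- + slice shift) and refactors run detection into a helper; both mutate `a` identically in Python,
-- and the proved equivalence is about the returned run list. Objective: simpler.

-- ===== PORT A =====

-- minrun(n): shared verbatim helper of both Python versions
def minrunGo (n r : Nat) : Nat :=
  if n ≥ 64 then minrunGo (n >>> 1) (r ||| (n &&& 1)) else n + r
  termination_by n
  decreasing_by simp only [Nat.shiftRight_one]; omega

-- `while i < n and a[i] < a[i-1]: i += 1` (shared verbatim by both versions)
def descEnd (a : List Int) (n i : Nat) : Nat :=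
  if i < n ∧ a.getD i 0 < a.getD (i - 1) 0 then descEnd a n (i + 1) else i
  termination_by n - i
  decreasing_by omega

-- `while i < n and a[i] >= a[i-1]: i += 1` (shared verbatim by both versions)
def ascEnd (a : List Int) (n i : Nat) : Nat :=
  if i < n ∧ a.getD (i - 1) 0 ≤ a.getD i 0 then ascEnd a n (i + 1) else i
  termination_by n - i
  decreasing_by omega

-- the binary-search `while lo < hi` loop of binary_insertion_sort
def bsearchA (a : List Int) (key : Int) (lo hi : Nat) : Nat :=
  if lo < hi then
    let mid := (lo + hi) / 2
    if a.getD mid 0 ≤ key then bsearchA a key (mid + 1) hi else bsearchA a key lo mid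
  else lo
  termination_by hi - lo
  decreasing_by all_goals omega

-- one iteration of binary_insertion_sort's for-loop:
-- `a[lo+1:i+1] = a[lo:i]; a[lo] = key` written as list surgery
def binInsertOne (a : List Int) (left i : Nat) : List Int :=
  let key := a.getD i 0
  let lo := bsearchA a key left i
  a.take lo ++ key :: ((a.drop lo).take (i - lo) ++ a.drop (i + 1))

-- binary_insertion_sort(a, left, right)
def binSortA (a : List Int) (left right : Nat) : List Int :=
  (List.range' (left + 1) (right - (left + 1))).foldl (fun acc i => binInsertOne acc left i) a

lemma descEnd_ge (a : List Int) (n i : Nat) : i ≤ descEnd a n i := by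
  unfold descEnd
  split
  · have := descEnd_ge a n (i + 1); omega
  · omega
  termination_by n - i
  decreasing_by omega

lemma ascEnd_ge (a : List Int) (n i : Nat) : i ≤ ascEnd a n i := by
  unfold ascEnd
  split
  · have := ascEnd_ge a n (i + 1); omega
  · omega
  termination_by n - i
  decreasing_by omega

-- the `while i < n` loop of run_decomposition (state: array a, index i, accumulated runs)
def runGoA (n m : Nat) (a : List Int) (i : Nat) (runs : List (Int × Int)) : List (Int × Int) :=
  if h : i < n then
    let start := i
    let i1 := i + 1
    let p : List Int × Nat :=
      if i1 < n ∧ a.getD i1 0 < a.getD (i1 - 1) 0 then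
        let j := descEnd a n i1
        (a.take start ++ ((a.drop start).take (j - start)).reverse ++ a.drop j, j)
      else (a, ascEnd a n i1)
    if p.2 - start < m then
      let e := min (start + m) n
      runGoA n m (binSortA p.1 start e) e (runs ++ [((start : Int), (e : Int))])
    else runGoA n m p.1 p.2 (runs ++ [((start : Int), (p.2 : Int))])
  else runs
  termination_by n - i
  decreasing_by
  · omega
  · rename_i h2
    have hd := descEnd_ge a n (i + 1)
    have ha := ascEnd_ge a n (i + 1)
    by_cases hc : (i + 1 < n ∧ a.getD (i + 1) 0 < a.getD (i + 1 - 1) 0) <;>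
      simp only [hc, if_pos, if_neg, not_false_iff] at h2 ⊢ <;> simp_all <;> omega

def run_decomposition (a : List Int) : List (Int × Int) :=
  let n := a.length
  let m := minrunGo n 0
  runGoA n m a 0 []

-- ===== PORT B =====

-- the backward-shifting `while j >= left and a[j] > key` loop of _insertion_sort
def linShiftB (a : List Int) (left : Nat) (key : Int) (j : Int) : List Int × Int :=
  if h : (left : Int) ≤ j ∧ key < a.getD j.toNat 0 then
    linShiftB (a.set (j + 1).toNat (a.getD j.toNat 0)) left key (j - 1)
  else (a, j)
  termination_by (j + 1 - left).toNat
  decreasing_by omega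

-- one iteration of _insertion_sort's for-loop
def linInsertOneB (a : List Int) (left i : Nat) : List Int :=
  let key := a.getD i 0
  let p := linShiftB a left key ((i : Int) - 1)
  p.1.set (p.2 + 1).toNat key

-- _insertion_sort(a, left, right)
def linSortB (a : List Int) (left right : Nat) : List Int :=
  (List.range' (left + 1) (right - (left + 1))).foldl (fun acc i => linInsertOneB acc left i) a

-- _natural_run(a, start, n): returns (updated array, end of run)
def naturalRunB (a : List Int) (start n : Nat) : List Int × Nat :=
  let i := start + 1
  if i < n ∧ a.getD i 0 < a.getD (i - 1) 0 then
    let j := descEnd a n i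
    (a.take start ++ ((a.drop start).take (j - start)).reverse ++ a.drop j, j)
  else (a, ascEnd a n i)

lemma naturalRunB_snd_gt (a : List Int) (start n : Nat) : start < (naturalRunB a start n).2 := by
  have hd := descEnd_ge a n (start + 1)
  have ha := ascEnd_ge a n (start + 1)
  simp only [naturalRunB]
  split <;> simp <;> omega

-- the `while start < n` loop of B's run_decomposition
def runGoB (n m : Nat) (a : List Int) (start : Nat) (runs : List (Int × Int)) : List (Int × Int) :=
  if h : start < n then
    let p := naturalRunB a start n
    if p.2 - start < m then
      let e := min (start + m) n
      runGoB n m (linSortB p.1 start e) e (runs ++ [((start : Int), (e : Int))])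
    else runGoB n m p.1 p.2 (runs ++ [((start : Int), (p.2 : Int))])
  else runs
  termination_by n - start
  decreasing_by
  · omega
  · show n - (naturalRunB a start n).2 < n - start
    have := naturalRunB_snd_gt a start n
    omega

def run_decomposition_alt (a : List Int) : List (Int × Int) :=
  let n := a.length
  let m := minrunGo n 0
  runGoB n m a 0 []

-- ===== PRECONDITION & SPEC =====
def Spec_run_decomposition (a : List Int) (out : List (Int × Int)) : Prop := out = run_decomposition_alt a
instance (a : List Int) (out : List (Int × Int)) : Decidable (Spec_run_decomposition a out) := by unfold Spec_run_decomposition; infer_instance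

-- ===== CLAIM (what is proved, stated in full; the proofs are below) =====
def Claim_equal_run_decomposition : Prop := ∀ (a : List Int), Dom_run_decomposition a → Spec_run_decomposition a (run_decomposition a)

-- ===== LEMMAS AND PROOFS =====

-- `a` restricted to indices [l, r) is nondecreasing
def SegSorted (a : List Int) (l r : Nat) : Prop :=
  ∀ p q : Nat, l ≤ p → p ≤ q → q < r → a.getD p 0 ≤ a.getD q 0

-- the array obtained from `a` by inserting `key` at position r of the segment ending at i
def insAt (a : List Int) (r i : Nat) (key : Int) : List Int :=
  a.take r ++ key :: ((a.drop r).take (i - r) ++ a.drop (i + 1))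

-- the intermediate array of B's shifting loop, when the hole is at position w
def bArr (a : List Int) (i w : Nat) : List Int :=
  a.take (w + 1) ++ (a.drop w).take (i - w) ++ a.drop (i + 1)

lemma take_eq (a : List Int) (n : Nat) (h : n < a.length) : a.take (n + 1) = a.take n ++ [a[n]] := by
  rw [List.take_add_one, List.getElem?_eq_getElem h]; rfl

lemma getD_eq (a : List Int) (n : Nat) (h : n < a.length) : a.getD n 0 = a[n] := by
  simp [List.getD_eq_getElem?_getD, List.getElem?_eq_getElem h]

lemma insAt_length (a : List Int) (r i : Nat) (key : Int) (hr : r ≤ i) (hi : i < a.length) :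
    (insAt a r i key).length = a.length := by
  simp [insAt]; omega

lemma insAt_set (a : List Int) (w i : Nat) (v key : Int) (hw : w ≤ a.length) :
    (insAt a w i v).set w key = insAt a w i key := by
  have ht : (a.take w).length = w := by simp; omega
  unfold insAt
  rw [List.set_append_right _ _ (by omega)]
  simp [ht]

lemma bArr_eq_insAt (a : List Int) (i w : Nat) (hw : w < a.length) :
    bArr a i w = insAt a w i (a.getD w 0) := by
  unfold bArr insAt
  rw [take_eq a w hw, getD_eq a w hw]
  simp only [List.append_assoc, List.singleton_append, List.cons_append, List.nil_append]

lemma insAt_shift (a : List Int) (i w : Nat) (h1 : 1 ≤ w) (hwi : w ≤ i) (hi : i < a.length) :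
    insAt a w i (a.getD (w - 1) 0) = insAt a (w - 1) i (a.getD (w - 1) 0) := by
  have hw1 : w - 1 < a.length := by omega
  have ht : a.take w = a.take (w - 1) ++ [a[w - 1]] := by
    have h := take_eq a (w - 1) hw1
    rwa [Nat.sub_add_cancel h1] at h
  have hd : (a.drop (w - 1)).take (i - (w - 1)) = a[w - 1] :: (a.drop w).take (i - w) := by
    have h := List.drop_eq_getElem_cons hw1
    rw [Nat.sub_add_cancel h1] at h
    rw [h, show i - (w - 1) = (i - w) + 1 from by omega]
    simp
  rw [insAt, insAt, ht, hd, getD_eq a (w - 1) hw1]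
  simp only [List.append_assoc, List.singleton_append, List.cons_append, List.nil_append]

lemma bArr_self (a : List Int) (i : Nat) : bArr a i i = a := by
  simp [bArr]

lemma L1 (a : List Int) (r i : Nat) (key : Int) (hr : r ≤ i) (hi : i < a.length)
    (p : Nat) (h : p < r) : (insAt a r i key).getD p 0 = a.getD p 0 := by
  have ht : (a.take r).length = r := by simp; omega
  rw [insAt, List.getD_append _ _ _ _ (by omega)]
  simp [List.getD_eq_getElem?_getD, List.getElem?_take, h]

lemma L2 (a : List Int) (r i : Nat) (key : Int) (hr : r ≤ i) (hi : i < a.length) :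
    (insAt a r i key).getD r 0 = key := by
  have ht : (a.take r).length = r := by simp; omega
  rw [insAt, List.getD_append_right _ _ _ _ (by omega)]
  simp [ht]

lemma L3 (a : List Int) (r i : Nat) (key : Int) (hr : r ≤ i) (hi : i < a.length)
    (p : Nat) (h1 : r < p) (h2 : p ≤ i) : (insAt a r i key).getD p 0 = a.getD (p - 1) 0 := by
  have ht : (a.take r).length = r := by simp; omega
  rw [insAt, List.getD_append_right _ _ _ _ (by omega), ht]
  have h3 : p - r = (p - r - 1) + 1 := by omega
  rw [h3]
  simp only [List.getD_cons_succ]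
  have hm : ((a.drop r).take (i - r)).length = i - r := by simp; omega
  rw [List.getD_append _ _ _ _ (by omega)]
  simp [List.getD_eq_getElem?_getD, List.getElem?_take, List.getElem?_drop,
    show p - r - 1 < i - r from by omega, show r + (p - r - 1) = p - 1 from by omega]

lemma bArr_getD_lt (a : List Int) (i w p : Nat) (hp : p < w) (hwi : w ≤ i) (hi : i < a.length) :
    (bArr a i w).getD p 0 = a.getD p 0 := by
  rw [bArr_eq_insAt a i w (by omega)]
  exact L1 _ _ _ _ hwi hi _ hp

lemma bArr_set_step (a : List Int) (i w : Nat) (h1 : 1 ≤ w) (hwi : w ≤ i) (hi : i < a.length) :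
    (bArr a i w).set w (a.getD (w - 1) 0) = bArr a i (w - 1) := by
  rw [bArr_eq_insAt a i w (by omega), insAt_set a w i _ _ (by omega),
    insAt_shift a i w h1 hwi hi, ← bArr_eq_insAt a i (w - 1) (by omega)]

lemma bsearchA_spec (a : List Int) (key : Int) (left i : Nat) (hS : SegSorted a left i) :
    ∀ (d lo hi : Nat), hi - lo ≤ d → left ≤ lo → lo ≤ hi → hi ≤ i →
    (∀ p, left ≤ p → p < lo → a.getD p 0 ≤ key) →
    (∀ p, hi ≤ p → p < i → key < a.getD p 0) →
    lo ≤ bsearchA a key lo hi ∧ bsearchA a key lo hi ≤ hi ∧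
    (∀ p, left ≤ p → p < bsearchA a key lo hi → a.getD p 0 ≤ key) ∧
    (∀ p, bsearchA a key lo hi ≤ p → p < i → key < a.getD p 0) := by
  intro d
  induction d with
  | zero =>
    intro lo hi hd h1 h2 h3 hlo hhi
    have he : ¬ lo < hi := by omega
    rw [bsearchA, if_neg he]
    exact ⟨le_refl _, h2, hlo, fun p hp hpi => hhi p (by omega) hpi⟩
  | succ d ih =>
    intro lo hi hd h1 h2 h3 hlo hhi
    by_cases hlt : lo < hi
    · rw [bsearchA, if_pos hlt]
      show (lo ≤ if a.getD ((lo + hi) / 2) 0 ≤ key then bsearchA a key ((lo + hi) / 2 + 1) hi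
          else bsearchA a key lo ((lo + hi) / 2)) ∧ _
      by_cases hm : a.getD ((lo + hi) / 2) 0 ≤ key
      · rw [if_pos hm]
        have hmid2 : (lo + hi) / 2 < hi := by omega
        have h := ih ((lo + hi) / 2 + 1) hi (by omega) (by omega) (by omega) h3
          (fun p hp hplt => by
            by_cases hpl : p < lo
            · exact hlo p hp hpl
            · exact le_trans (hS p ((lo + hi) / 2) hp (by omega) (by omega)) hm)
          hhi
        exact ⟨by omega, h.2.1, h.2.2.1, h.2.2.2⟩
      · rw [if_neg hm]
        push_neg at hm
        have hmid2 : (lo + hi) / 2 < hi := by omega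
        have h := ih lo ((lo + hi) / 2) (by omega) h1 (by omega) (by omega) hlo
          (fun p hp hpi => lt_of_lt_of_le hm (hS ((lo + hi) / 2) p (by omega) hp hpi))
        exact ⟨h.1, by omega, h.2.2.1, h.2.2.2⟩
    · rw [bsearchA, if_neg hlt]
      exact ⟨le_refl _, h2, hlo, fun p hp hpi => hhi p (by omega) hpi⟩

lemma linShiftB_spec (a : List Int) (left i : Nat) (key : Int) (hi : i < a.length) :
    ∀ w : Nat, left ≤ w → w ≤ i →
    (∀ p, w ≤ p → p < i → key < a.getD p 0) →
    ∃ w', left ≤ w' ∧ w' ≤ w ∧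
      linShiftB (bArr a i w) left key ((w : Int) - 1) = (bArr a i w', (w' : Int) - 1) ∧
      (∀ p, w' ≤ p → p < i → key < a.getD p 0) ∧
      (w' = left ∨ a.getD (w' - 1) 0 ≤ key) := by
  intro w
  induction w using Nat.strong_induction_on with
  | _ w ih =>
    intro hlw hwi hgt
    by_cases hc : left + 1 ≤ w ∧ key < a.getD (w - 1) 0
    · have hw1 : 1 ≤ w := by omega
      have htn : ((w : Int) - 1).toNat = w - 1 := by omega
      have hgD : (bArr a i w).getD ((w : Int) - 1).toNat 0 = a.getD (w - 1) 0 := by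
        rw [htn]; exact bArr_getD_lt a i w (w - 1) (by omega) hwi hi
      have hcond : (left : Int) ≤ (w : Int) - 1 ∧ key < (bArr a i w).getD ((w : Int) - 1).toNat 0 := by
        rw [hgD]; exact ⟨by omega, hc.2⟩
      rw [linShiftB, dif_pos hcond]
      have hset : (bArr a i w).set ((w : Int) - 1 + 1).toNat ((bArr a i w).getD ((w : Int) - 1).toNat 0)
          = bArr a i (w - 1) := by
        rw [hgD, show ((w : Int) - 1 + 1).toNat = w from by omega]
        exact bArr_set_step a i w hw1 hwi hi
      rw [hset, show (w : Int) - 1 - 1 = ((w - 1 : Nat) : Int) - 1 from by omega]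
      obtain ⟨w', hw'1, hw'2, hw'3, hw'4, hw'5⟩ := ih (w - 1) (by omega) (by omega) (by omega)
        (fun p hp hpi => by
          by_cases hpw : w ≤ p
          · exact hgt p hpw hpi
          · have hpe : p = w - 1 := by omega
            subst hpe; exact hc.2)
      exact ⟨w', hw'1, by omega, hw'3, hw'4, hw'5⟩
    · have hcond : ¬ ((left : Int) ≤ (w : Int) - 1 ∧ key < (bArr a i w).getD ((w : Int) - 1).toNat 0) := by
        intro hcond
        have hw1 : left + 1 ≤ w := by omega
        have htn : ((w : Int) - 1).toNat = w - 1 := by omega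
        rw [htn, bArr_getD_lt a i w (w - 1) (by omega) hwi hi] at hcond
        exact hc ⟨hw1, hcond.2⟩
      rw [linShiftB, dif_neg hcond]
      refine ⟨w, hlw, le_refl _, rfl, hgt, ?_⟩
      by_cases hwl : w = left
      · exact Or.inl hwl
      · right
        by_contra hk
        exact hc ⟨by omega, by omega⟩

-- on a sorted segment the two insertion strategies insert at the same position
lemma insert_eq (a : List Int) (left i : Nat) (hl : left ≤ i) (hi : i < a.length)
    (hS : SegSorted a left i) :
    ∃ r : Nat, left ≤ r ∧ r ≤ i ∧
      binInsertOne a left i = insAt a r i (a.getD i 0) ∧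
      linInsertOneB a left i = insAt a r i (a.getD i 0) ∧
      (∀ p, left ≤ p → p < r → a.getD p 0 ≤ a.getD i 0) ∧
      (∀ p, r ≤ p → p < i → a.getD i 0 < a.getD p 0) := by
  set key := a.getD i 0 with hkey
  obtain ⟨hb1, hb2, hb3, hb4⟩ := bsearchA_spec a key left i hS (i - left) left i (by omega)
    (le_refl _) hl (le_refl _) (fun p hp hpl => absurd hpl (by omega))
    (fun p hp hpi => absurd hpi (by omega))
  obtain ⟨w', hw'1, hw'2, hw'3, hw'4, hw'5⟩ := linShiftB_spec a left i key hi i hl (le_refl _)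
    (fun p hp hpi => absurd hpi (by omega))
  rw [bArr_self] at hw'3
  have hw'lo : ∀ p, left ≤ p → p < w' → a.getD p 0 ≤ key := by
    intro p hp hpw
    rcases hw'5 with h | h
    · omega
    · exact le_trans (hS p (w' - 1) hp (by omega) (by omega)) h
  have hrw : bsearchA a key left i = w' := by
    by_contra hne
    rcases Nat.lt_or_ge (bsearchA a key left i) w' with h | h
    · have h1 := hb4 (bsearchA a key left i) (le_refl _) (by omega)
      have h2 := hw'lo (bsearchA a key left i) hb1 h
      omega
    · have hlt : w' < bsearchA a key left i := by omega
      have h1 := hb3 w' hw'1 hlt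
      have h2 := hw'4 w' (le_refl _) (by omega)
      omega
  refine ⟨w', le_trans hw'1 (le_refl _), by omega, ?_, ?_, hw'lo, hw'4⟩
  · show insAt a (bsearchA a key left i) i key = insAt a w' i key
    rw [hrw]
  · show (linShiftB a left key ((i : Int) - 1)).1.set ((linShiftB a left key ((i : Int) - 1)).2 + 1).toNat key
      = insAt a w' i key
    rw [hw'3]
    show (bArr a i w').set ((w' : Int) - 1 + 1).toNat key = insAt a w' i key
    rw [show ((w' : Int) - 1 + 1).toNat = w' from by omega, bArr_eq_insAt a i w' (by omega),
      insAt_set a w' i _ _ (by omega)]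

lemma insAt_sorted (a : List Int) (left r i : Nat) (key : Int)
    (hl : left ≤ r) (hr : r ≤ i) (hi : i < a.length) (hS : SegSorted a left i)
    (hlo : ∀ p, left ≤ p → p < r → a.getD p 0 ≤ key)
    (hhi : ∀ p, r ≤ p → p < i → key < a.getD p 0) :
    SegSorted (insAt a r i key) left (i + 1) := by
  intro p q hp hpq hq
  have hq' : q ≤ i := by omega
  by_cases h1 : p < r
  · rw [L1 a r i key hr hi p h1]
    by_cases h2 : q < r
    · rw [L1 a r i key hr hi q h2]; exact hS p q hp hpq (by omega)
    · by_cases h3 : q = r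
      · rw [h3, L2 a r i key hr hi]; exact hlo p hp h1
      · rw [L3 a r i key hr hi q (by omega) hq']
        exact hS p (q - 1) hp (by omega) (by omega)
  · by_cases h2 : p = r
    · rw [h2, L2 a r i key hr hi]
      by_cases h3 : q = r
      · rw [h3, L2 a r i key hr hi]
      · rw [L3 a r i key hr hi q (by omega) hq']
        exact le_of_lt (hhi (q - 1) (by omega) (by omega))
    · rw [L3 a r i key hr hi p (by omega) (by omega),
        L3 a r i key hr hi q (by omega) hq']
      exact hS (p - 1) (q - 1) (by omega) (by omega) (by omega)

lemma sortLoop_eq (left : Nat) :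
    ∀ (c : Nat) (a : List Int) (i : Nat), left < i → i + c ≤ a.length → SegSorted a left i →
    ((List.range' i c).foldl (fun acc k => binInsertOne acc left k) a =
      (List.range' i c).foldl (fun acc k => linInsertOneB acc left k) a) ∧
    ((List.range' i c).foldl (fun acc k => binInsertOne acc left k) a).length = a.length := by
  intro c
  induction c with
  | zero => intro a i _ _ _; exact ⟨rfl, rfl⟩
  | succ c ih =>
    intro a i hli hlen hS
    have hi : i < a.length := by omega
    obtain ⟨r, hr1, hr2, hbin, hlin, hlo, hhi⟩ := insert_eq a left i (by omega) hi hS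
    rw [List.range'_succ]
    simp only [List.foldl_cons]
    rw [hbin, hlin]
    have hlen' : (insAt a r i (a.getD i 0)).length = a.length := insAt_length a r i _ hr2 hi
    have h := ih (insAt a r i (a.getD i 0)) (i + 1) (by omega) (by omega)
      (insAt_sorted a left r i _ hr1 hr2 hi hS hlo hhi)
    exact ⟨h.1, by rw [h.2, hlen']⟩

lemma binSort_spec (a : List Int) (left right : Nat) (hr : right ≤ a.length) :
    binSortA a left right = linSortB a left right ∧ (binSortA a left right).length = a.length := by
  unfold binSortA linSortB
  by_cases h : right ≤ left + 1
  · rw [show right - (left + 1) = 0 from by omega]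
    exact ⟨rfl, rfl⟩
  · exact sortLoop_eq left (right - (left + 1)) a (left + 1) (by omega) (by omega)
      (fun p q _ _ hq => le_of_eq (congrArg (fun t => a.getD t 0) (by omega : p = q)))

lemma descEnd_le (a : List Int) (n i : Nat) (h : i ≤ n) : descEnd a n i ≤ n := by
  unfold descEnd
  split
  · next hc => exact descEnd_le a n (i + 1) (by omega)
  · exact h
  termination_by n - i
  decreasing_by omega

lemma ascEnd_le (a : List Int) (n i : Nat) (h : i ≤ n) : ascEnd a n i ≤ n := by
  unfold ascEnd
  split
  · next hc => exact ascEnd_le a n (i + 1) (by omega)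
  · exact h
  termination_by n - i
  decreasing_by omega

lemma naturalRunB_fst_length (a : List Int) (start n : Nat) (h : start < n) (hn : n = a.length) :
    (naturalRunB a start n).1.length = n := by
  simp only [naturalRunB]
  split
  · next hc =>
    have h1 := descEnd_ge a n (start + 1)
    have h2 := descEnd_le a n (start + 1) (by omega)
    simp
    omega
  · exact hn.symm

lemma naturalRunB_snd_le (a : List Int) (start n : Nat) (h : start < n) :
    (naturalRunB a start n).2 ≤ n := by
  simp only [naturalRunB]
  split
  · exact descEnd_le a n (start + 1) (by omega)
  · exact ascEnd_le a n (start + 1) (by omega)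

lemma runGo_eq (n m : Nat) :
    ∀ (k : Nat) (a : List Int) (i : Nat) (runs : List (Int × Int)), n - i ≤ k → a.length = n →
    runGoA n m a i runs = runGoB n m a i runs := by
  intro k
  induction k with
  | zero =>
    intro a i runs hk hl
    have h : ¬ i < n := by omega
    rw [runGoA, dif_neg h, runGoB, dif_neg h]
  | succ k ih =>
    intro a i runs hk hl
    by_cases h : i < n
    · rw [runGoA, dif_pos h, runGoB, dif_pos h]
      show (if (naturalRunB a i n).2 - i < m then
          runGoA n m (binSortA (naturalRunB a i n).1 i (min (i + m) n)) (min (i + m) n)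
            (runs ++ [((i : Int), ((min (i + m) n : Nat) : Int))])
        else runGoA n m (naturalRunB a i n).1 (naturalRunB a i n).2
            (runs ++ [((i : Int), ((naturalRunB a i n).2 : Int))])) =
        (if (naturalRunB a i n).2 - i < m then
          runGoB n m (linSortB (naturalRunB a i n).1 i (min (i + m) n)) (min (i + m) n)
            (runs ++ [((i : Int), ((min (i + m) n : Nat) : Int))])
        else runGoB n m (naturalRunB a i n).1 (naturalRunB a i n).2
            (runs ++ [((i : Int), ((naturalRunB a i n).2 : Int))]))
      have hfl : (naturalRunB a i n).1.length = n := naturalRunB_fst_length a i n h hl.symm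
      have hgt := naturalRunB_snd_gt a i n
      have hle := naturalRunB_snd_le a i n h
      by_cases hb : (naturalRunB a i n).2 - i < m
      · rw [if_pos hb, if_pos hb]
        have he : min (i + m) n ≤ (naturalRunB a i n).1.length := by omega
        obtain ⟨hs1, hs2⟩ := binSort_spec (naturalRunB a i n).1 i (min (i + m) n) he
        rw [hs1]
        exact ih _ _ _ (by omega) (by rw [← hs1, hs2]; omega)
      · rw [if_neg hb, if_neg hb]
        exact ih _ _ _ (by omega) (by omega)
    · rw [runGoA, dif_neg h, runGoB, dif_neg h]

-- ===== VERDICT (by name: the statement is the Claim_ definition above) =====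
theorem run_decomposition_spec : Claim_equal_run_decomposition := by
  intro a _
  unfold Spec_run_decomposition run_decomposition run_decomposition_alt
  exact runGo_eq a.length (minrunGo a.length 0) a.length a 0 [] (by omega) rfl
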